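-- pv_equiv track=rewrite | github.com/madangel2/advent-of-code | 2024/day12.py | calcFencesPrice2
-- ===== SOURCE A (Python) =====
-- posCheckDiag = [(-1, -1), (1, 1), (-1, 1), (1, -1)]
--
-- def calcFencesPrice2(group):
--     totalFences = 0
--     for elem in group:
--         for diag in posCheckDiag:
--             neighborD = (elem[0] + diag[0], elem[1] + diag[1])
--             neighbor1 = (elem[0], elem[1] + diag[1])
--             neighbor2 = (elem[0] + diag[0], elem[1])
--
--             if neighborD not in group and neighbor1 not in group and neighbor2 not in group:
--                 totalFences += 1
--             elif neighborD not in group and neighbor1 in group and neighbor2 in group: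
--                 totalFences += 1
--             elif neighborD in group and neighbor1 not in group and neighbor2 not in group:
--                 totalFences += 1
--
--     return totalFences * len(group)
-- ===== SOURCE B (Python) =====
-- def calcFencesPrice2(group):
--     # Count corners of the region by sweeping the lattice vertices once:
--     # at each vertex look at the 2x2 block of cells around it; an odd number
--     # of filled cells is one corner, two diagonally-touching cells are two.
--     cells = set(group)
--     verts = set()
--     for (x, y) in cells:
--         verts.update([(x, y), (x, y + 1), (x + 1, y), (x + 1, y + 1)])
--     total = 0
--     for (vx, vy) in verts:
--         a = (vx - 1, vy - 1) in cells
--         b = (vx - 1, vy) in cells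
--         c = (vx, vy - 1) in cells
--         d = (vx, vy) in cells
--         k = a + b + c + d
--         if k == 1 or k == 3:
--             total += 1
--         elif k == 2 and a == d:
--             total += 2
--     return total * len(group)
-- ===== Notes on version B (the rewrite author's own statement) =====
-- stated objective: alternative
-- what changed: B sweeps the distinct lattice vertices once and classifies each from its 2x2 cell block (odd block = 1 corner, diagonal pair = 2) using set lookups, instead of A's per-cell per-diagonal corner tests with linear list membership.
-- outside the precondition, e.g. on calcFencesPrice2([(0, 0), (0, 0)]): A returns 16, B returns 8
import Mathlib
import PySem

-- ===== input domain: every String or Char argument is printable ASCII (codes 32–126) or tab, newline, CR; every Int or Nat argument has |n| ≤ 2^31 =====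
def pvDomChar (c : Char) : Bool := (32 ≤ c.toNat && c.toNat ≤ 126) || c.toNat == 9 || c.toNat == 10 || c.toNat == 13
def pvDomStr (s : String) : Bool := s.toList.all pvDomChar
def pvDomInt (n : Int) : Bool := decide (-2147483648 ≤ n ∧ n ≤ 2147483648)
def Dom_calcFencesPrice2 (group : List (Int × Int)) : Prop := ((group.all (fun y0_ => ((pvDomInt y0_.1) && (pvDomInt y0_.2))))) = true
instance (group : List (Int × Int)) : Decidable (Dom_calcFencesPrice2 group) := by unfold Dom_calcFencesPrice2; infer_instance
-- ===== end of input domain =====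

-- B replaces A's per-cell diagonal corner tests by a single sweep over the lattice
-- vertices of the region (each vertex classified from its 2x2 cell block), with set
-- lookups instead of list membership.

-- ===== PORT A =====
def posCheckDiag : List (Int × Int) := [(-1, -1), (1, 1), (-1, 1), (1, -1)]

def calcFencesPrice2 (group : List (Int × Int)) : Int :=
  let totalFences := group.foldl (fun tf elem =>
    posCheckDiag.foldl (fun tf diag =>
      let neighborD := (elem.1 + diag.1, elem.2 + diag.2)
      let neighbor1 := (elem.1, elem.2 + diag.2)
      let neighbor2 := (elem.1 + diag.1, elem.2)
      if neighborD ∉ group ∧ neighbor1 ∉ group ∧ neighbor2 ∉ group then tf + 1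
      else if neighborD ∉ group ∧ neighbor1 ∈ group ∧ neighbor2 ∈ group then tf + 1
      else if neighborD ∈ group ∧ neighbor1 ∉ group ∧ neighbor2 ∉ group then tf + 1
      else tf) tf) (0 : Int)
  totalFences * (group.length : Int)

-- ===== PORT B =====
def cornerCount (cells : PySem.Set (Int × Int)) (v : Int × Int) : Int :=
  let a := PySem.Set.contains cells (v.1 - 1, v.2 - 1)
  let b := PySem.Set.contains cells (v.1 - 1, v.2)
  let c := PySem.Set.contains cells (v.1, v.2 - 1)
  let d := PySem.Set.contains cells (v.1, v.2)
  let k : Int := (if a then 1 else 0) + (if b then 1 else 0) + (if c then 1 else 0) + (if d then 1 else 0)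
  if k = 1 ∨ k = 3 then 1
  else if k = 2 ∧ a = d then 2
  else 0

def calcFencesPrice2_alt (group : List (Int × Int)) : Int :=
  let cells : PySem.Set (Int × Int) := PySem.Set.ofList group
  let verts : PySem.Set (Int × Int) := cells.foldl (fun vs e =>
    PySem.Set.update vs [(e.1, e.2), (e.1, e.2 + 1), (e.1 + 1, e.2), (e.1 + 1, e.2 + 1)])
    (PySem.Set.empty)
  let total := verts.foldl (fun t v => t + cornerCount cells v) (0 : Int)
  total * (group.length : Int)

-- ===== PRECONDITION & SPEC =====
-- Pre_ excludes lists with duplicate cells: a region is a set of cells, and A's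
-- counting of each duplicated cell's corners once per occurrence is an artefact
-- of iterating the raw list.
def Pre_calcFencesPrice2 (group : List (Int × Int)) : Prop := group.Nodup
instance (group : List (Int × Int)) : Decidable (Pre_calcFencesPrice2 group) := by
  unfold Pre_calcFencesPrice2; infer_instance

def pvWitness_calcFencesPrice2 : (List (Int × Int)) := [(0, 0), (0, 1), (1, 1)]

def Spec_calcFencesPrice2 (group : List (Int × Int)) (out : Int) : Prop := out = calcFencesPrice2_alt group
instance (group : List (Int × Int)) (out : Int) : Decidable (Spec_calcFencesPrice2 group out) := by unfold Spec_calcFencesPrice2; infer_instance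

-- ===== CLAIM (what is proved, stated in full; the proofs are below) =====
def Claim_equal_calcFencesPrice2 : Prop := ∀ (group : List (Int × Int)), Dom_calcFencesPrice2 group → Pre_calcFencesPrice2 group → Spec_calcFencesPrice2 group (calcFencesPrice2 group)

-- ===== LEMMAS AND PROOFS =====

-- A's per-(cell, diagonal) contribution, over a Finset of cells.
def fm (s : Finset (Int × Int)) (x y dx dy : Int) : Int :=
  if (x + dx, y + dy) ∉ s ∧ (x, y + dy) ∉ s ∧ (x + dx, y) ∉ s then 1
  else if (x + dx, y + dy) ∉ s ∧ (x, y + dy) ∈ s ∧ (x + dx, y) ∈ s then 1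
  else if (x + dx, y + dy) ∈ s ∧ (x, y + dy) ∉ s ∧ (x + dx, y) ∉ s then 1
  else 0

def Fcell (s : Finset (Int × Int)) (e : Int × Int) : Int :=
  fm s e.1 e.2 (-1) (-1) + fm s e.1 e.2 1 1 + fm s e.1 e.2 (-1) 1 + fm s e.1 e.2 1 (-1)

-- B's per-vertex contribution, over a Finset of cells.
def G (s : Finset (Int × Int)) (v : Int × Int) : Int :=
  if ((if (v.1 - 1, v.2 - 1) ∈ s then (1:Int) else 0) + (if (v.1 - 1, v.2) ∈ s then 1 else 0) +
      (if (v.1, v.2 - 1) ∈ s then 1 else 0) + (if (v.1, v.2) ∈ s then 1 else 0)) = 1 ∨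
     ((if (v.1 - 1, v.2 - 1) ∈ s then (1:Int) else 0) + (if (v.1 - 1, v.2) ∈ s then 1 else 0) +
      (if (v.1, v.2 - 1) ∈ s then 1 else 0) + (if (v.1, v.2) ∈ s then 1 else 0)) = 3 then 1
  else if ((if (v.1 - 1, v.2 - 1) ∈ s then (1:Int) else 0) + (if (v.1 - 1, v.2) ∈ s then 1 else 0) +
      (if (v.1, v.2 - 1) ∈ s then 1 else 0) + (if (v.1, v.2) ∈ s then 1 else 0)) = 2 ∧
      (((v.1 - 1, v.2 - 1) ∈ s) ↔ ((v.1, v.2) ∈ s)) then 2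
  else 0

-- the vertex set of a cell Finset
def Vset (s : Finset (Int × Int)) : Finset (Int × Int) :=
  s.image (fun e => (e.1, e.2)) ∪ s.image (fun e => (e.1, e.2 + 1)) ∪
  s.image (fun e => (e.1 + 1, e.2)) ∪ s.image (fun e => (e.1 + 1, e.2 + 1))

lemma stepA (group : List (Int × Int)) (x y dx dy tf : Int) :
    (if (x + dx, y + dy) ∉ group ∧ (x, y + dy) ∉ group ∧ (x + dx, y) ∉ group then tf + 1
     else if (x + dx, y + dy) ∉ group ∧ (x, y + dy) ∈ group ∧ (x + dx, y) ∈ group then tf + 1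
     else if (x + dx, y + dy) ∈ group ∧ (x, y + dy) ∉ group ∧ (x + dx, y) ∉ group then tf + 1
     else tf) = tf + fm group.toFinset x y dx dy := by
  simp only [fm, List.mem_toFinset]
  split_ifs <;> ring

lemma A_eq (group : List (Int × Int)) :
    calcFencesPrice2 group = (group.map (Fcell group.toFinset)).sum * (group.length : Int) := by
  have inner : ∀ (tf : Int) (e : Int × Int),
      posCheckDiag.foldl (fun tf diag =>
        if (e.1 + diag.1, e.2 + diag.2) ∉ group ∧ (e.1, e.2 + diag.2) ∉ group ∧ (e.1 + diag.1, e.2) ∉ group then tf + 1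
        else if (e.1 + diag.1, e.2 + diag.2) ∉ group ∧ (e.1, e.2 + diag.2) ∈ group ∧ (e.1 + diag.1, e.2) ∈ group then tf + 1
        else if (e.1 + diag.1, e.2 + diag.2) ∈ group ∧ (e.1, e.2 + diag.2) ∉ group ∧ (e.1 + diag.1, e.2) ∉ group then tf + 1
        else tf) tf = tf + Fcell group.toFinset e := by
    intro tf e
    simp only [posCheckDiag, List.foldl_cons, List.foldl_nil, stepA, Fcell]
    ring
  have outer : ∀ (l : List (Int × Int)) (tf : Int),
      l.foldl (fun tf elem =>
        posCheckDiag.foldl (fun tf diag =>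
          if (elem.1 + diag.1, elem.2 + diag.2) ∉ group ∧ (elem.1, elem.2 + diag.2) ∉ group ∧ (elem.1 + diag.1, elem.2) ∉ group then tf + 1
          else if (elem.1 + diag.1, elem.2 + diag.2) ∉ group ∧ (elem.1, elem.2 + diag.2) ∈ group ∧ (elem.1 + diag.1, elem.2) ∈ group then tf + 1
          else if (elem.1 + diag.1, elem.2 + diag.2) ∈ group ∧ (elem.1, elem.2 + diag.2) ∉ group ∧ (elem.1 + diag.1, elem.2) ∉ group then tf + 1
          else tf) tf) tf = tf + (l.map (Fcell group.toFinset)).sum := by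
    intro l tf
    simp only [inner]
    rw [PySem.List.foldl_add]
  simp only [calcFencesPrice2, outer]
  ring

lemma sum_toFinset_eq (group : List (Int × Int)) (h : group.Nodup) (f : (Int × Int) → Int) :
    (group.map f).sum = ∑ e ∈ group.toFinset, f e := by
  exact (List.sum_toFinset f h).symm

-- translation reindexing
lemma trans_sum (s V : Finset (Int × Int)) (o1 o2 : Int) (g : (Int × Int) → Int)
    (hV : ∀ e ∈ s, (e.1 + o1, e.2 + o2) ∈ V) :
    ∑ e ∈ s, g e = ∑ v ∈ V, if (v.1 - o1, v.2 - o2) ∈ s then g (v.1 - o1, v.2 - o2) else 0 := by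
  rw [← Finset.sum_filter]
  have himg : V.filter (fun v => (v.1 - o1, v.2 - o2) ∈ s) = s.image (fun e => (e.1 + o1, e.2 + o2)) := by
    ext v
    simp only [Finset.mem_filter, Finset.mem_image]
    constructor
    · rintro ⟨hv, hm⟩
      exact ⟨_, hm, by simp⟩
    · rintro ⟨e, he, rfl⟩
      refine ⟨hV e he, ?_⟩
      simpa using he
  rw [himg, Finset.sum_image (by intro x hx y hy hxy; simp only [Prod.ext_iff] at hxy ⊢; omega)]
  apply Finset.sum_congr rfl
  intro e he
  congr 1
  simp

-- local 16-case lemma: the four diagonal contributions attributed to a vertex equal G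
lemma local_eq (s : Finset (Int × Int)) (v : Int × Int) :
    (if (v.1, v.2) ∈ s then fm s v.1 v.2 (-1) (-1) else 0) +
    (if (v.1 - 1, v.2 - 1) ∈ s then fm s (v.1 - 1) (v.2 - 1) 1 1 else 0) +
    (if (v.1, v.2 - 1) ∈ s then fm s v.1 (v.2 - 1) (-1) 1 else 0) +
    (if (v.1 - 1, v.2) ∈ s then fm s (v.1 - 1) v.2 1 (-1) else 0) = G s v := by
  have e1 : v.1 - 1 + 1 = v.1 := by ring
  have e2 : v.2 - 1 + 1 = v.2 := by ring
  have e3 : v.1 + -1 = v.1 - 1 := by ring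
  have e4 : v.2 + -1 = v.2 - 1 := by ring
  simp only [fm, G, e1, e2, e3, e4]
  by_cases hA : (v.1 - 1, v.2 - 1) ∈ s <;> by_cases hB : (v.1 - 1, v.2) ∈ s <;>
    by_cases hC : (v.1, v.2 - 1) ∈ s <;> by_cases hD : (v.1, v.2) ∈ s <;>
    simp [hA, hB, hC, hD]

lemma sum_Fcell_eq (s : Finset (Int × Int)) :
    ∑ e ∈ s, Fcell s e = ∑ v ∈ Vset s, G s v := by
  have hV1 : ∀ e ∈ s, ((e.1 : Int) + 0, e.2 + 0) ∈ Vset s := by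
    intro e he
    simp only [Vset, Finset.mem_union, Finset.mem_image]
    exact Or.inl (Or.inl (Or.inl ⟨e, he, by simp⟩))
  have hV2 : ∀ e ∈ s, ((e.1 : Int) + 1, e.2 + 1) ∈ Vset s := by
    intro e he
    simp only [Vset, Finset.mem_union, Finset.mem_image]
    exact Or.inr ⟨e, he, by simp⟩
  have hV3 : ∀ e ∈ s, ((e.1 : Int) + 0, e.2 + 1) ∈ Vset s := by
    intro e he
    simp only [Vset, Finset.mem_union, Finset.mem_image]
    exact Or.inl (Or.inl (Or.inr ⟨e, he, by simp⟩))
  have hV4 : ∀ e ∈ s, ((e.1 : Int) + 1, e.2 + 0) ∈ Vset s := by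
    intro e he
    simp only [Vset, Finset.mem_union, Finset.mem_image]
    exact Or.inl (Or.inr ⟨e, he, by simp⟩)
  have split : ∑ e ∈ s, Fcell s e =
      (∑ e ∈ s, fm s e.1 e.2 (-1) (-1)) + (∑ e ∈ s, fm s e.1 e.2 1 1) +
      (∑ e ∈ s, fm s e.1 e.2 (-1) 1) + (∑ e ∈ s, fm s e.1 e.2 1 (-1)) := by
    simp only [Fcell]
    rw [Finset.sum_add_distrib, Finset.sum_add_distrib, Finset.sum_add_distrib]
  rw [split,
    trans_sum s (Vset s) 0 0 (fun e => fm s e.1 e.2 (-1) (-1)) hV1,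
    trans_sum s (Vset s) 1 1 (fun e => fm s e.1 e.2 1 1) hV2,
    trans_sum s (Vset s) 0 1 (fun e => fm s e.1 e.2 (-1) 1) hV3,
    trans_sum s (Vset s) 1 0 (fun e => fm s e.1 e.2 1 (-1)) hV4,
    ← Finset.sum_add_distrib, ← Finset.sum_add_distrib, ← Finset.sum_add_distrib]
  apply Finset.sum_congr rfl
  intro v hv
  have h := local_eq s v
  simp only [sub_zero] at h ⊢
  exact h

-- B-side lemmas
lemma corner_eq (group : List (Int × Int)) (v : Int × Int) :
    cornerCount (PySem.Set.ofList group) v = G group.toFinset v := by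
  have hc : ∀ p : Int × Int,
      PySem.Set.contains (PySem.Set.ofList group) p = decide (p ∈ group.toFinset) := by
    intro p
    by_cases h : p ∈ group <;>
      simp [PySem.Set.contains_eq_listContains, PySem.Set.mem_ofList, List.mem_toFinset, h]
  simp only [cornerCount, G, hc]
  by_cases hA : (v.1 - 1, v.2 - 1) ∈ group.toFinset <;>
    by_cases hB : (v.1 - 1, v.2) ∈ group.toFinset <;>
    by_cases hC : (v.1, v.2 - 1) ∈ group.toFinset <;>
    by_cases hD : (v.1, v.2) ∈ group.toFinset <;>
    simp [hA, hB, hC, hD]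

def vertsOf (group : List (Int × Int)) : PySem.Set (Int × Int) :=
  (PySem.Set.ofList group).foldl (fun vs e =>
    PySem.Set.update vs [(e.1, e.2), (e.1, e.2 + 1), (e.1 + 1, e.2), (e.1 + 1, e.2 + 1)])
    (PySem.Set.empty)

lemma mem_vertsFold (l : List (Int × Int)) (vs : PySem.Set (Int × Int)) (y : Int × Int) :
    (y ∈ l.foldl (fun vs e =>
      PySem.Set.update vs [(e.1, e.2), (e.1, e.2 + 1), (e.1 + 1, e.2), (e.1 + 1, e.2 + 1)]) vs ↔
      y ∈ vs ∨ ∃ e ∈ l, y = (e.1, e.2) ∨ y = (e.1, e.2 + 1) ∨ y = (e.1 + 1, e.2) ∨ y = (e.1 + 1, e.2 + 1)) := by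
  induction l generalizing vs with
  | nil => simp
  | cons a l ih =>
    simp only [List.foldl_cons]
    rw [ih]
    simp only [PySem.Set.mem_update, List.mem_cons, List.not_mem_nil, or_false]
    constructor
    · rintro ((h | h) | ⟨e, he, h⟩)
      · exact Or.inl h
      · exact Or.inr ⟨a, Or.inl rfl, by tauto⟩
      · exact Or.inr ⟨e, Or.inr he, h⟩
    · rintro (h | ⟨e, he | he, h⟩)
      · exact Or.inl (Or.inl h)
      · subst he; exact Or.inl (Or.inr (by tauto))
      · exact Or.inr ⟨e, he, h⟩

lemma nodup_vertsFold (l : List (Int × Int)) (vs : PySem.Set (Int × Int)) (hvs : vs.Nodup) :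
    (l.foldl (fun vs e =>
      PySem.Set.update vs [(e.1, e.2), (e.1, e.2 + 1), (e.1 + 1, e.2), (e.1 + 1, e.2 + 1)]) vs).Nodup := by
  induction l generalizing vs with
  | nil => exact hvs
  | cons a l ih =>
    simp only [List.foldl_cons]
    exact ih _ (PySem.Set.nodup_update _ _ hvs)

lemma verts_toFinset (group : List (Int × Int)) :
    (vertsOf group).toFinset = Vset group.toFinset := by
  ext v
  simp only [List.mem_toFinset, vertsOf, mem_vertsFold, PySem.Set.mem_ofList,
    Vset, Finset.mem_union, Finset.mem_image, List.mem_toFinset]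
  constructor
  · rintro (h | ⟨e, he, h⟩)
    · simp [PySem.Set.empty] at h
    · rcases h with h | h | h | h <;> subst h
      · exact Or.inl (Or.inl (Or.inl ⟨e, he, rfl⟩))
      · exact Or.inl (Or.inl (Or.inr ⟨e, he, rfl⟩))
      · exact Or.inl (Or.inr ⟨e, he, rfl⟩)
      · exact Or.inr ⟨e, he, rfl⟩
  · rintro (((⟨e, he, rfl⟩ | ⟨e, he, rfl⟩) | ⟨e, he, rfl⟩) | ⟨e, he, rfl⟩) <;>
      exact Or.inr ⟨e, he, by tauto⟩

lemma B_eq (group : List (Int × Int)) :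
    calcFencesPrice2_alt group = (∑ v ∈ Vset group.toFinset, G group.toFinset v) * (group.length : Int) := by
  simp only [calcFencesPrice2_alt]
  rw [show ((PySem.Set.ofList group).foldl (fun vs e =>
      PySem.Set.update vs [(e.1, e.2), (e.1, e.2 + 1), (e.1 + 1, e.2), (e.1 + 1, e.2 + 1)])
      PySem.Set.empty) = vertsOf group from rfl]
  rw [PySem.List.foldl_add]
  have hnd : (vertsOf group).Nodup :=
    nodup_vertsFold (PySem.Set.ofList group) PySem.Set.empty (by simp [PySem.Set.empty])
  have hsum : ((vertsOf group).map (G group.toFinset)).sum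
      = ∑ v ∈ Vset group.toFinset, G group.toFinset v := by
    rw [← List.sum_toFinset _ hnd, verts_toFinset]
  rw [List.map_congr_left (fun v _ => corner_eq group v), hsum]
  ring

-- ===== VERDICT (by name: the statement is the Claim_ definition above) =====
theorem calcFencesPrice2_spec : Claim_equal_calcFencesPrice2 := by
  intro group _ hpre
  unfold Spec_calcFencesPrice2
  rw [A_eq, B_eq, sum_toFinset_eq group hpre, sum_Fcell_eq]
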